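-- pv_equiv track=rewrite | github.com/Minerstove/Python | cs11/hope-1/(download_and_submit_code_here!)_offline_judge/11_flood_control/OJ/model_solution.py | flood_control
-- ===== SOURCE A (Python) =====
-- def trace_square_edge(c1, c2):
--     x1,y1=c1
--     x2,y2=c2
--     x1,x2=min(x1,x2),max(x1,x2)
--     y1,y2=min(y1,y2),max(y1,y2)
--     a = tuple((i,j) for i in range(x1,x2+1) for j in range(y1,y2+1) if (i==x1 or i==x2) or (j==y1 or j==y2))
--     return a
--
-- def trace_square_inside(c1, c2):
--     x1,y1=c1
--     x2,y2=c2
--     x1,x2=min(x1,x2),max(x1,x2)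
--     y1,y2=min(y1,y2),max(y1,y2)
--     a = tuple((i,j) for i in range(x1,x2+1) for j in range(y1,y2+1) if not ((i==x1 or i==x2) or (j==y1 or j==y2)))
--     return a
--
-- def check_square(r,c,rn,cn,grid):
--     edge = trace_square_edge((r,c),(rn,cn))
--     inside = trace_square_inside((r,c),(rn,cn))
--     a = tuple(False for tent_r in range(r,rn+1) for tent_c in range(c,cn+1) if (grid[tent_r][tent_c]!='X' and (tent_r,tent_c) in edge) or (grid[tent_r][tent_c]!=' ' and (tent_r, tent_c) in inside))
--     return False not in a
--
-- def flood_control(grid):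
--     R,C = len(grid), len(grid[0])
--     count = tuple((i-1)**2
--      for r in range(R)
--      for c in range(C)
--      for i in range(1,min(R-r,C-c))
--      if check_square(r,c,r+i,c+i,grid))
--     return sum(count)*50
-- ===== SOURCE B (Python) =====
-- def flood_control(grid):
--     R, C = len(grid), len(grid[0])
--     total = 0
--     for i in range(1, min(R, C)):
--         for r in range(R - i):
--             for c in range(C - i):
--                 if all(grid[r + dr][c + dc] == ('X' if dr == 0 or dr == i or dc == 0 or dc == i else ' ')
--                        for dr in range(i + 1) for dc in range(i + 1)):
--                     total += (i - 1) ** 2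
--     return total * 50
-- ===== Notes on version B (the rewrite author's own statement) =====
-- stated objective: faster
-- what changed: B drops A's edge/inside coordinate-tuple construction and per-cell tuple-membership scans entirely: it enumerates squares size-major and validates each square in one short-circuited pass classifying each cell arithmetically as border ('X') or interior (' '), keeping a running total instead of materialising a tuple of weights and summing it.
import Mathlib
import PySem

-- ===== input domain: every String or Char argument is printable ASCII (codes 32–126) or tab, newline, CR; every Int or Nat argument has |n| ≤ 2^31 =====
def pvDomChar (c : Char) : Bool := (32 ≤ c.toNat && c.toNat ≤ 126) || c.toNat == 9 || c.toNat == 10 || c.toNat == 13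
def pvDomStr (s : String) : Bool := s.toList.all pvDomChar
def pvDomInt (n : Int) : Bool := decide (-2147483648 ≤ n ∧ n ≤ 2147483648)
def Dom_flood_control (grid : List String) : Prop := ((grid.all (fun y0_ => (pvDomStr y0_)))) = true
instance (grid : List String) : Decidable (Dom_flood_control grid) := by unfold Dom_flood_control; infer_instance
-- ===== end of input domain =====

-- B replaces A's edge/inside coordinate tuples and per-cell membership scans by one direct
-- size-major pass that classifies each cell of a candidate square arithmetically (faster).


-- ===== PORT A =====
def pvGetA (grid : List String) (i j : Int) : Option Char :=
  match PySem.List.pyGet? grid i with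
  | none => none
  | some s => PySem.Str.pyGet? s j

def trace_square_edge (c1 c2 : Int × Int) : List (Int × Int) :=
  let x1 := min c1.1 c2.1
  let x2 := max c1.1 c2.1
  let y1 := min c1.2 c2.2
  let y2 := max c1.2 c2.2
  (PySem.List.pyRange x1 (x2 + 1) 1).flatMap (fun i =>
    ((PySem.List.pyRange y1 (y2 + 1) 1).filter
      (fun j => decide ((i = x1 ∨ i = x2) ∨ (j = y1 ∨ j = y2)))).map (fun j => (i, j)))

def trace_square_inside (c1 c2 : Int × Int) : List (Int × Int) :=
  let x1 := min c1.1 c2.1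
  let x2 := max c1.1 c2.1
  let y1 := min c1.2 c2.2
  let y2 := max c1.2 c2.2
  (PySem.List.pyRange x1 (x2 + 1) 1).flatMap (fun i =>
    ((PySem.List.pyRange y1 (y2 + 1) 1).filter
      (fun j => decide (¬ ((i = x1 ∨ i = x2) ∨ (j = y1 ∨ j = y2))))).map (fun j => (i, j)))

def check_square (r c rn cn : Int) (grid : List String) : Option Bool :=
  let edge := trace_square_edge (r, c) (rn, cn)
  let inside := trace_square_inside (r, c) (rn, cn)
  let a : Option (List Bool) :=
    (PySem.List.pyRange r (rn + 1) 1).foldl (fun acc tr =>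
      (PySem.List.pyRange c (cn + 1) 1).foldl (fun acc2 tc =>
        match acc2, pvGetA grid tr tc with
        | some l, some ch =>
            if (ch ≠ 'X' ∧ (tr, tc) ∈ edge) ∨ (ch ≠ ' ' ∧ (tr, tc) ∈ inside)
            then some (l ++ [false]) else some l
        | _, _ => none) acc) (some [])
  match a with
  | none => none
  | some l => some (!(l.contains false))

def flood_control (grid : List String) : Int :=
  let R : Int := grid.length
  match PySem.List.pyGet? grid 0 with
  | none => 0   -- Python raises IndexError here (grid = []); excluded by Pre_
  | some row0 =>
    let C : Int := PySem.Str.len row0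
    let count : Option (List Int) :=
      (PySem.List.pyRange 0 R 1).foldl (fun acc r =>
        (PySem.List.pyRange 0 C 1).foldl (fun acc2 c =>
          (PySem.List.pyRange 1 (min (R - r) (C - c)) 1).foldl (fun acc3 i =>
            match acc3, check_square r c (r + i) (c + i) grid with
            | some l, some b => if b then some (l ++ [(i - 1) ^ 2]) else some l
            | _, _ => none) acc2) acc) (some [])
    match count with
    | none => 0   -- Python raises IndexError inside check_square; excluded by Pre_
    | some l => (l.foldl (· + ·) 0) * 50

-- ===== PORT B =====
def pvGetB (grid : List String) (i j : Int) : Option Char :=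
  match PySem.List.pyGet? grid i with
  | none => none
  | some s => PySem.Str.pyGet? s j

def pvAllOK (grid : List String) (r c i : Int) : Option Bool :=
  (PySem.List.pyRange 0 (i + 1) 1).foldl (fun acc dr =>
    (PySem.List.pyRange 0 (i + 1) 1).foldl (fun acc2 dc =>
      match acc2 with
      | some false => some false   -- all() already failed: Python never evaluates further cells
      | some true =>
        match pvGetB grid (r + dr) (c + dc) with
        | none => none
        | some ch => some (ch == (if dr = 0 ∨ dr = i ∨ dc = 0 ∨ dc = i then 'X' else ' '))
      | none => none) acc) (some true)

def flood_control_alt (grid : List String) : Int :=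
  let R : Int := grid.length
  match PySem.List.pyGet? grid 0 with
  | none => 0   -- Python raises IndexError here (grid = []); excluded by Pre_
  | some row0 =>
    let C : Int := PySem.Str.len row0
    let res : Option Int :=
      (PySem.List.pyRange 1 (min R C) 1).foldl (fun acc i =>
        (PySem.List.pyRange 0 (R - i) 1).foldl (fun acc2 r =>
          (PySem.List.pyRange 0 (C - i) 1).foldl (fun acc3 c =>
            match acc3 with
            | none => none
            | some t =>
              match pvAllOK grid r c i with
              | none => none
              | some b => some (if b then t + (i - 1) ^ 2 else t)) acc2) acc) (some 0)
    match res with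
    | none => 0   -- Python raises IndexError; excluded by Pre_
    | some t => t * 50

-- ===== PRECONDITION & SPEC =====
-- Pre_ excludes exactly the inputs on which Python A raises IndexError: the empty grid, and
-- (when at least one 2x2 square fits, i.e. R ≥ 2 and C ≥ 2) grids with a row shorter than row 0.
def Pre_flood_control (grid : List String) : Prop :=
  grid ≠ [] ∧
    (2 ≤ grid.length → 2 ≤ grid.headI.toList.length →
      ∀ s ∈ grid, grid.headI.toList.length ≤ s.toList.length)
instance (grid : List String) : Decidable (Pre_flood_control grid) := by
  unfold Pre_flood_control; infer_instance

def pvWitness_flood_control : List String := ["XX", "XX"]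

def Spec_flood_control (grid : List String) (out : Int) : Prop := out = flood_control_alt grid
instance (grid : List String) (out : Int) : Decidable (Spec_flood_control grid out) := by
  unfold Spec_flood_control; infer_instance

-- ===== CLAIM (what is proved, stated in full; the proofs are below) =====
def Claim_equal_flood_control : Prop :=
  ∀ (grid : List String), Dom_flood_control grid → Pre_flood_control grid →
    Spec_flood_control grid (flood_control grid)

-- ===== LEMMAS AND PROOFS =====

-- fold shapes: an Option-threaded loop whose step is known on `some` accumulators ------------

theorem pvFoldlFix {α β : Type} (f : β → α → β) (a : β) (hf : ∀ x, f a x = a)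
    (xs : List α) : xs.foldl f a = a := by
  induction xs with
  | nil => rfl
  | cons x xs ih => rw [List.foldl_cons, hf x, ih]

theorem pvFoldOptFlat {α β : Type} (g : α → List β) (f : Option (List β) → α → Option (List β)) :
    ∀ xs : List α, (∀ x ∈ xs, ∀ l, f (some l) x = some (l ++ g x)) →
      ∀ l0 : List β, xs.foldl f (some l0) = some (l0 ++ xs.flatMap g) := by
  intro xs
  induction xs with
  | nil => intro _ l0; simp
  | cons x xs ih =>
    intro hf l0
    rw [List.foldl_cons, hf x (by simp),
      ih (fun y hy l => hf y (by simp [hy]) l) (l0 ++ g x)]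
    simp

theorem pvFoldOptIf {α β : Type} (p : α → Bool) (w : α → β)
    (f : Option (List β) → α → Option (List β)) :
    ∀ xs : List α, (∀ x ∈ xs, ∀ l, f (some l) x = if p x then some (l ++ [w x]) else some l) →
      ∀ l0 : List β, xs.foldl f (some l0) = some (l0 ++ (xs.filter p).map w) := by
  intro xs
  induction xs with
  | nil => intro _ l0; simp
  | cons x xs ih =>
    intro hf l0
    rw [List.foldl_cons, hf x (by simp)]
    by_cases h : p x
    · rw [if_pos h, ih (fun y hy l => hf y (by simp [hy]) l) (l0 ++ [w x])]
      simp [h]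
    · rw [if_neg h, ih (fun y hy l => hf y (by simp [hy]) l) l0]
      simp [h]

theorem pvFoldOptAnd {α : Type} (q : α → Bool) (f : Option Bool → α → Option Bool) :
    ∀ xs : List α, (∀ x ∈ xs, f (some true) x = some (q x)) →
      (∀ x ∈ xs, f (some false) x = some false) →
      ∀ b : Bool, xs.foldl f (some b) = some (b && xs.all q) := by
  intro xs
  induction xs with
  | nil => intro _ _ b; simp
  | cons x xs ih =>
    intro hft hff b
    cases b with
    | true =>
      rw [List.foldl_cons, hft x (by simp),
        ih (fun y hy => hft y (by simp [hy])) (fun y hy => hff y (by simp [hy])) (q x)]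
      simp [List.all_cons]
    | false =>
      rw [List.foldl_cons, hff x (by simp),
        ih (fun y hy => hft y (by simp [hy])) (fun y hy => hff y (by simp [hy])) false]
      simp

theorem pvFoldOptAddIf {α : Type} (p : α → Bool) (w : α → Int) (f : Option Int → α → Option Int) :
    ∀ xs : List α, (∀ x ∈ xs, ∀ t, f (some t) x = some (if p x then t + w x else t)) →
      ∀ t0 : Int, xs.foldl f (some t0) = some (t0 + ((xs.filter p).map w).sum) := by
  intro xs
  induction xs with
  | nil => intro _ t0; simp
  | cons x xs ih =>
    intro hf t0
    rw [List.foldl_cons, hf x (by simp)]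
    by_cases h : p x
    · rw [if_pos h, ih (fun y hy t => hf y (by simp [hy]) t) (t0 + w x)]
      simp [h, add_assoc]
    · rw [if_neg h, ih (fun y hy t => hf y (by simp [hy]) t) t0]
      simp [h]

theorem pvFoldOptAdd {α : Type} (g : α → Int) (f : Option Int → α → Option Int) :
    ∀ xs : List α, (∀ x ∈ xs, ∀ t, f (some t) x = some (t + g x)) →
      ∀ t0 : Int, xs.foldl f (some t0) = some (t0 + (xs.map g).sum) := by
  intro xs
  induction xs with
  | nil => intro _ t0; simp
  | cons x xs ih =>
    intro hf t0
    rw [List.foldl_cons, hf x (by simp), ih (fun y hy t => hf y (by simp [hy]) t) (t0 + g x)]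
    simp [add_assoc]

-- sums of filtered / flattened lists ---------------------------------------------------------

theorem pvSumFilter {α : Type} (p : α → Bool) (w : α → Int) (xs : List α) :
    ((xs.filter p).map w).sum = (xs.map (fun x => if p x then w x else 0)).sum := by
  induction xs with
  | nil => rfl
  | cons x xs ih =>
    by_cases h : p x <;> simp [h, ih]

theorem pvSumFlatMap {α : Type} (g : α → List Int) (xs : List α) :
    (xs.flatMap g).sum = (xs.map (fun x => (g x).sum)).sum := by
  induction xs with
  | nil => rfl
  | cons x xs ih => simp [List.flatMap_cons, List.sum_append, ih]

theorem pvSumRange (a b : Int) (f : Int → Int) :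
    ((PySem.List.pyRange a b 1).map f).sum = ∑ k ∈ Finset.range ((b - a).toNat), f (a + k) := by
  rw [PySem.List.pyRange_one, List.map_map]
  rfl

-- membership in A's edge / inside tuples -----------------------------------------------------

theorem pvMemEdge (r c i tr tc : Int) (hi : 0 ≤ i) :
    ((tr, tc) ∈ trace_square_edge (r, c) (r + i, c + i)) ↔
      ((r ≤ tr ∧ tr ≤ r + i) ∧ (c ≤ tc ∧ tc ≤ c + i) ∧
        (tr = r ∨ tr = r + i ∨ tc = c ∨ tc = c + i)) := by
  have h1 : min r (r + i) = r := by omega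
  have h2 : max r (r + i) = r + i := by omega
  have h3 : min c (c + i) = c := by omega
  have h4 : max c (c + i) = c + i := by omega
  simp only [trace_square_edge]
  simp [h1, h2, h3, h4, List.mem_flatMap, List.mem_filter, List.mem_map,
    PySem.List.mem_pyRange_one, Prod.mk.injEq]
  omega

theorem pvMemInside (r c i tr tc : Int) (hi : 0 ≤ i) :
    ((tr, tc) ∈ trace_square_inside (r, c) (r + i, c + i)) ↔
      ((r ≤ tr ∧ tr ≤ r + i) ∧ (c ≤ tc ∧ tc ≤ c + i) ∧
        ¬ (tr = r ∨ tr = r + i ∨ tc = c ∨ tc = c + i)) := by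
  have h1 : min r (r + i) = r := by omega
  have h2 : max r (r + i) = r + i := by omega
  have h3 : min c (c + i) = c := by omega
  have h4 : max c (c + i) = c + i := by omega
  simp only [trace_square_inside]
  simp [h1, h2, h3, h4, List.mem_flatMap, List.mem_filter, List.mem_map,
    PySem.List.mem_pyRange_one, Prod.mk.injEq]
  omega

-- the common per-square predicate ------------------------------------------------------------

def pvSq (grid : List String) (r c i : Int) : Bool :=
  (PySem.List.pyRange 0 (i + 1) 1).all fun dr =>
    (PySem.List.pyRange 0 (i + 1) 1).all fun dc =>
      pvGetB grid (r + dr) (c + dc)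
        == some (if dr = 0 ∨ dr = i ∨ dc = 0 ∨ dc = i then 'X' else ' ')

def pvBad (grid : List String) (r c i tr tc : Int) : Bool :=
  decide ((((pvGetB grid tr tc).getD '?') ≠ 'X' ∧
            (tr, tc) ∈ trace_square_edge (r, c) (r + i, c + i)) ∨
          (((pvGetB grid tr tc).getD '?') ≠ ' ' ∧
            (tr, tc) ∈ trace_square_inside (r, c) (r + i, c + i)))

theorem pvGetA_eq : pvGetA = pvGetB := rfl

theorem pvBadIff (grid : List String) (r c i dr dc : Int) (hi : 1 ≤ i)
    (h0 : 0 ≤ dr) (h1 : dr ≤ i) (h2 : 0 ≤ dc) (h3 : dc ≤ i)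
    (ch : Char) (hch : pvGetB grid (r + dr) (c + dc) = some ch) :
    pvBad grid r c i (r + dr) (c + dc)
      = !(pvGetB grid (r + dr) (c + dc)
            == some (if dr = 0 ∨ dr = i ∨ dc = 0 ∨ dc = i then 'X' else ' ')) := by
  have he := pvMemEdge r c i (r + dr) (c + dc) (by omega)
  have hins := pvMemInside r c i (r + dr) (c + dc) (by omega)
  by_cases hb : dr = 0 ∨ dr = i ∨ dc = 0 ∨ dc = i
  · have hedge : (r + dr, c + dc) ∈ trace_square_edge (r, c) (r + i, c + i) :=
      he.mpr ⟨⟨by omega, by omega⟩, ⟨by omega, by omega⟩, by omega⟩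
    have hnotin : ¬ (r + dr, c + dc) ∈ trace_square_inside (r, c) (r + i, c + i) := by
      intro hmem
      rcases hins.mp hmem with ⟨_, _, hno⟩
      omega
    simp only [pvBad, hch, Option.getD_some, if_pos hb]
    simp [hedge, hnotin]
    by_cases hx : ch = 'X' <;> simp [hx]
  · have hnedge : ¬ (r + dr, c + dc) ∈ trace_square_edge (r, c) (r + i, c + i) := by
      intro hmem
      rcases he.mp hmem with ⟨_, _, hyes⟩
      omega
    have hin : (r + dr, c + dc) ∈ trace_square_inside (r, c) (r + i, c + i) :=
      hins.mpr ⟨⟨by omega, by omega⟩, ⟨by omega, by omega⟩, by omega⟩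
    simp only [pvBad, hch, Option.getD_some, if_neg hb]
    simp [hnedge, hin]
    by_cases hx : ch = ' ' <;> simp [hx]

-- A's check_square computes pvSq -------------------------------------------------------------

theorem pvCheckA (grid : List String) (r c i : Int) (hi : 1 ≤ i)
    (hs : ∀ dr dc : Int, 0 ≤ dr → dr ≤ i → 0 ≤ dc → dc ≤ i →
      (pvGetB grid (r + dr) (c + dc)).isSome) :
    check_square r c (r + i) (c + i) grid = some (pvSq grid r c i) := by
  have hs' : ∀ tr tc : Int, r ≤ tr → tr ≤ r + i → c ≤ tc → tc ≤ c + i →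
      ∃ ch, pvGetB grid tr tc = some ch := by
    intro tr tc a1 a2 a3 a4
    have h := hs (tr - r) (tc - c) (by omega) (by omega) (by omega) (by omega)
    have e1 : r + (tr - r) = tr := by omega
    have e2 : c + (tc - c) = tc := by omega
    rw [e1, e2] at h
    exact Option.isSome_iff_exists.mp h
  simp only [check_square]
  have hinner : ∀ tr : Int, r ≤ tr → tr ≤ r + i → ∀ l : List Bool,
      (PySem.List.pyRange c (c + i + 1) 1).foldl (fun acc2 tc =>
        match acc2, pvGetA grid tr tc with
        | some l, some ch =>
            if (ch ≠ 'X' ∧ (tr, tc) ∈ trace_square_edge (r, c) (r + i, c + i)) ∨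
               (ch ≠ ' ' ∧ (tr, tc) ∈ trace_square_inside (r, c) (r + i, c + i))
            then some (l ++ [false]) else some l
        | _, _ => none) (some l)
      = some (l ++ (((PySem.List.pyRange c (c + i + 1) 1).filter
          (fun tc => pvBad grid r c i tr tc)).map (fun _ => false))) := by
    intro tr htr1 htr2 l
    apply pvFoldOptIf
    intro tc htc l2
    rw [PySem.List.mem_pyRange_one] at htc
    obtain ⟨ch, hch⟩ := hs' tr tc htr1 htr2 (by omega) (by omega)
    rw [pvGetA_eq, hch]
    dsimp only
    simp only [pvBad, hch, Option.getD_some]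
    by_cases hcond : (ch ≠ 'X' ∧ (tr, tc) ∈ trace_square_edge (r, c) (r + i, c + i)) ∨
         (ch ≠ ' ' ∧ (tr, tc) ∈ trace_square_inside (r, c) (r + i, c + i))
    · rw [if_pos hcond, if_pos (by simpa using hcond)]
    · rw [if_neg hcond, if_neg (by simpa using hcond)]
  have hout : (PySem.List.pyRange r (r + i + 1) 1).foldl (fun acc tr =>
      (PySem.List.pyRange c (c + i + 1) 1).foldl (fun acc2 tc =>
        match acc2, pvGetA grid tr tc with
        | some l, some ch =>
            if (ch ≠ 'X' ∧ (tr, tc) ∈ trace_square_edge (r, c) (r + i, c + i)) ∨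
               (ch ≠ ' ' ∧ (tr, tc) ∈ trace_square_inside (r, c) (r + i, c + i))
            then some (l ++ [false]) else some l
        | _, _ => none) acc) (some ([] : List Bool))
      = some ([] ++ (PySem.List.pyRange r (r + i + 1) 1).flatMap (fun tr =>
          ((PySem.List.pyRange c (c + i + 1) 1).filter
            (fun tc => pvBad grid r c i tr tc)).map (fun _ => false))) := by
    apply pvFoldOptFlat
    intro tr htr l
    rw [PySem.List.mem_pyRange_one] at htr
    exact hinner tr (by omega) (by omega) l
  rw [hout]
  dsimp only
  rw [List.nil_append]
  congr 1
  apply Bool.coe_iff_coe.mp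
  simp only [Bool.not_eq_true']
  rw [← Bool.not_eq_true]
  rw [List.contains_iff_mem]
  simp only [pvSq, List.all_eq_true, List.mem_flatMap, List.mem_filter, List.mem_map,
    PySem.List.mem_pyRange_one]
  constructor
  · intro hno dr hdr dc hdc
    obtain ⟨ch, hch⟩ := hs' (r + dr) (c + dc) (by omega) (by omega) (by omega) (by omega)
    by_contra hne
    apply hno
    refine ⟨r + dr, ⟨by omega, by omega⟩, ⟨c + dc, ⟨⟨by omega, by omega⟩, ?_⟩, trivial⟩⟩
    rw [pvBadIff grid r c i dr dc hi (by omega) (by omega) (by omega) (by omega) ch hch]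
    simp only [Bool.not_eq_true'] at hne ⊢
    simp [hne]
  · rintro hall ⟨tr, ⟨htr1, htr2⟩, tc, ⟨⟨htc1, htc2⟩, hbad⟩, _⟩
    have h := hall (tr - r) ⟨by omega, by omega⟩ (tc - c) ⟨by omega, by omega⟩
    obtain ⟨ch, hch⟩ := hs' tr tc (by omega) (by omega) (by omega) (by omega)
    have e1 : r + (tr - r) = tr := by omega
    have e2 : c + (tc - c) = tc := by omega
    rw [e1, e2] at h
    have hbb := pvBadIff grid r c i (tr - r) (tc - c) hi (by omega) (by omega)
      (by omega) (by omega) ch (by rw [e1, e2]; exact hch)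
    rw [e1, e2] at hbb
    rw [hbb, h] at hbad
    simp at hbad

-- B's pvAllOK computes pvSq ------------------------------------------------------------------

theorem pvAllOK_eq (grid : List String) (r c i : Int) (_hi : 1 ≤ i)
    (hs : ∀ dr dc : Int, 0 ≤ dr → dr ≤ i → 0 ≤ dc → dc ≤ i →
      (pvGetB grid (r + dr) (c + dc)).isSome) :
    pvAllOK grid r c i = some (pvSq grid r c i) := by
  simp only [pvAllOK]
  have hinner : ∀ dr : Int, 0 ≤ dr → dr ≤ i →
      (PySem.List.pyRange 0 (i + 1) 1).foldl (fun acc2 dc =>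
        match acc2 with
        | some false => some false
        | some true =>
          match pvGetB grid (r + dr) (c + dc) with
          | none => none
          | some ch => some (ch == (if dr = 0 ∨ dr = i ∨ dc = 0 ∨ dc = i then 'X' else ' '))
        | none => none) (some true)
      = some ((PySem.List.pyRange 0 (i + 1) 1).all (fun dc =>
          pvGetB grid (r + dr) (c + dc)
            == some (if dr = 0 ∨ dr = i ∨ dc = 0 ∨ dc = i then 'X' else ' '))) := by
    intro dr hdr1 hdr2
    have h := pvFoldOptAnd (fun dc =>
        pvGetB grid (r + dr) (c + dc)
          == some (if dr = 0 ∨ dr = i ∨ dc = 0 ∨ dc = i then 'X' else ' '))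
      (fun acc2 dc =>
        match acc2 with
        | some false => some false
        | some true =>
          match pvGetB grid (r + dr) (c + dc) with
          | none => none
          | some ch => some (ch == (if dr = 0 ∨ dr = i ∨ dc = 0 ∨ dc = i then 'X' else ' '))
        | none => none)
      (PySem.List.pyRange 0 (i + 1) 1) ?hft (fun _ _ => rfl) true
    · rw [h]
      simp
    case hft =>
      intro dc hdc
      rw [PySem.List.mem_pyRange_one] at hdc
      have hsm := hs dr dc (by omega) (by omega) (by omega) (by omega)
      obtain ⟨ch, hch⟩ := Option.isSome_iff_exists.mp hsm
      simp [hch]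
  have hart := pvFoldOptAnd (fun dr =>
      (PySem.List.pyRange 0 (i + 1) 1).all (fun dc =>
        pvGetB grid (r + dr) (c + dc)
          == some (if dr = 0 ∨ dr = i ∨ dc = 0 ∨ dc = i then 'X' else ' ')))
    (fun acc dr =>
      (PySem.List.pyRange 0 (i + 1) 1).foldl (fun acc2 dc =>
        match acc2 with
        | some false => some false
        | some true =>
          match pvGetB grid (r + dr) (c + dc) with
          | none => none
          | some ch => some (ch == (if dr = 0 ∨ dr = i ∨ dc = 0 ∨ dc = i then 'X' else ' '))
        | none => none) acc)
    (PySem.List.pyRange 0 (i + 1) 1) ?hft2 ?hff2 true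
  · rw [hart]
    simp [pvSq]
  case hft2 =>
    intro dr hdr
    rw [PySem.List.mem_pyRange_one] at hdr
    exact hinner dr (by omega) (by omega)
  case hff2 =>
    intro dr _
    exact pvFoldlFix _ _ (fun _ => rfl) _

-- the sum swap -------------------------------------------------------------------------------

theorem pvSwapNat (Rn Cn : Nat) (G : Nat → Nat → Nat → Int) :
    (∑ kr ∈ Finset.range Rn, ∑ kc ∈ Finset.range Cn,
      ∑ ki ∈ Finset.range ((min ((Rn : Int) - kr) ((Cn : Int) - kc) - 1).toNat), G kr kc ki)
    = ∑ ki ∈ Finset.range ((min (Rn : Int) (Cn : Int) - 1).toNat),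
        ∑ kr ∈ Finset.range (((Rn : Int) - (1 + ki)).toNat),
          ∑ kc ∈ Finset.range (((Cn : Int) - (1 + ki)).toNat), G kr kc ki := by
  have hstep1 : ∀ kr kc : Nat,
      (∑ ki ∈ Finset.range ((min ((Rn : Int) - kr) ((Cn : Int) - kc) - 1).toNat), G kr kc ki)
      = ∑ ki ∈ Finset.range ((min (Rn : Int) (Cn : Int) - 1).toNat),
          if ki ∈ Finset.range ((min ((Rn : Int) - kr) ((Cn : Int) - kc) - 1).toNat)
          then G kr kc ki else 0 := by
    intro kr kc
    have hsub : Finset.range ((min ((Rn : Int) - kr) ((Cn : Int) - kc) - 1).toNat)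
        ⊆ Finset.range ((min (Rn : Int) (Cn : Int) - 1).toNat) := by
      intro x hx
      simp only [Finset.mem_range] at hx ⊢
      omega
    calc
      (∑ ki ∈ Finset.range ((min ((Rn : Int) - kr) ((Cn : Int) - kc) - 1).toNat), G kr kc ki)
        = ∑ ki ∈ Finset.range ((min ((Rn : Int) - kr) ((Cn : Int) - kc) - 1).toNat),
            if ki ∈ Finset.range ((min ((Rn : Int) - kr) ((Cn : Int) - kc) - 1).toNat)
            then G kr kc ki else 0 :=
          Finset.sum_congr rfl (fun x hx => (if_pos hx).symm)
      _ = _ := Finset.sum_subset hsub (fun x _ hnx => if_neg hnx)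
  calc
    (∑ kr ∈ Finset.range Rn, ∑ kc ∈ Finset.range Cn,
      ∑ ki ∈ Finset.range ((min ((Rn : Int) - kr) ((Cn : Int) - kc) - 1).toNat), G kr kc ki)
      = ∑ kr ∈ Finset.range Rn, ∑ kc ∈ Finset.range Cn,
          ∑ ki ∈ Finset.range ((min (Rn : Int) (Cn : Int) - 1).toNat),
            if ki ∈ Finset.range ((min ((Rn : Int) - kr) ((Cn : Int) - kc) - 1).toNat)
            then G kr kc ki else 0 :=
        Finset.sum_congr rfl fun kr _ => Finset.sum_congr rfl fun kc _ => hstep1 kr kc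
    _ = ∑ kr ∈ Finset.range Rn,
          ∑ ki ∈ Finset.range ((min (Rn : Int) (Cn : Int) - 1).toNat),
            ∑ kc ∈ Finset.range Cn,
              if ki ∈ Finset.range ((min ((Rn : Int) - kr) ((Cn : Int) - kc) - 1).toNat)
              then G kr kc ki else 0 :=
        Finset.sum_congr rfl fun kr _ => Finset.sum_comm
    _ = ∑ ki ∈ Finset.range ((min (Rn : Int) (Cn : Int) - 1).toNat),
          ∑ kr ∈ Finset.range Rn, ∑ kc ∈ Finset.range Cn,
            if ki ∈ Finset.range ((min ((Rn : Int) - kr) ((Cn : Int) - kc) - 1).toNat)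
            then G kr kc ki else 0 := Finset.sum_comm
    _ = _ := by
        apply Finset.sum_congr rfl
        intro ki hki
        rw [Finset.mem_range] at hki
        have hcond : ∀ kr kc : Nat,
            (ki ∈ Finset.range ((min ((Rn : Int) - kr) ((Cn : Int) - kc) - 1).toNat))
            ↔ (kr ∈ Finset.range (((Rn : Int) - (1 + ki)).toNat) ∧
               kc ∈ Finset.range (((Cn : Int) - (1 + ki)).toNat)) := by
          intro kr kc
          simp only [Finset.mem_range]
          omega
        have hsubR : Finset.range (((Rn : Int) - (1 + ki)).toNat) ⊆ Finset.range Rn := by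
          intro x hx
          simp only [Finset.mem_range] at hx ⊢
          omega
        have hsubC : Finset.range (((Cn : Int) - (1 + ki)).toNat) ⊆ Finset.range Cn := by
          intro x hx
          simp only [Finset.mem_range] at hx ⊢
          omega
        calc
          (∑ kr ∈ Finset.range Rn, ∑ kc ∈ Finset.range Cn,
            if ki ∈ Finset.range ((min ((Rn : Int) - kr) ((Cn : Int) - kc) - 1).toNat)
            then G kr kc ki else 0)
            = ∑ kr ∈ Finset.range Rn,
                if kr ∈ Finset.range (((Rn : Int) - (1 + ki)).toNat)
                then ∑ kc ∈ Finset.range (((Cn : Int) - (1 + ki)).toNat), G kr kc ki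
                else 0 := by
              apply Finset.sum_congr rfl
              intro kr _
              by_cases hkr : kr ∈ Finset.range (((Rn : Int) - (1 + ki)).toNat)
              · rw [if_pos hkr]
                calc
                  (∑ kc ∈ Finset.range Cn,
                    if ki ∈ Finset.range ((min ((Rn : Int) - kr) ((Cn : Int) - kc) - 1).toNat)
                    then G kr kc ki else 0)
                    = ∑ kc ∈ Finset.range Cn,
                        if kc ∈ Finset.range (((Cn : Int) - (1 + ki)).toNat)
                        then G kr kc ki else 0 := by
                      apply Finset.sum_congr rfl
                      intro kc _
                      by_cases hkc : kc ∈ Finset.range (((Cn : Int) - (1 + ki)).toNat)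
                      · rw [if_pos hkc, if_pos ((hcond kr kc).mpr ⟨hkr, hkc⟩)]
                      · rw [if_neg (fun hmem => hkc ((hcond kr kc).mp hmem).2), if_neg hkc]
                  _ = ∑ kc ∈ Finset.range (((Cn : Int) - (1 + ki)).toNat), G kr kc ki := by
                      rw [← Finset.sum_subset hsubC (fun x _ hnx => if_neg hnx)]
                      exact Finset.sum_congr rfl (fun x hx => if_pos hx)
              · rw [if_neg hkr]
                apply Finset.sum_eq_zero
                intro kc _
                exact if_neg (fun hmem => hkr ((hcond kr kc).mp hmem).1)
          _ = ∑ kr ∈ Finset.range (((Rn : Int) - (1 + ki)).toNat),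
                ∑ kc ∈ Finset.range (((Cn : Int) - (1 + ki)).toNat), G kr kc ki := by
              rw [← Finset.sum_subset hsubR (fun x _ hnx => if_neg hnx)]
              exact Finset.sum_congr rfl (fun x hx => if_pos hx)

theorem pvSwapSum (R C : Int) (hR : 0 ≤ R) (hC : 0 ≤ C) (F : Int → Int → Int → Int) :
    ((PySem.List.pyRange 0 R 1).map (fun r =>
      ((PySem.List.pyRange 0 C 1).map (fun c =>
        ((PySem.List.pyRange 1 (min (R - r) (C - c)) 1).map (fun i => F r c i)).sum)).sum)).sum
    = ((PySem.List.pyRange 1 (min R C) 1).map (fun i =>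
        ((PySem.List.pyRange 0 (R - i) 1).map (fun r =>
          ((PySem.List.pyRange 0 (C - i) 1).map (fun c => F r c i)).sum)).sum)).sum := by
  obtain ⟨Rn, rfl⟩ : ∃ n : Nat, R = (n : Int) := ⟨R.toNat, (Int.toNat_of_nonneg hR).symm⟩
  obtain ⟨Cn, rfl⟩ : ∃ n : Nat, C = (n : Int) := ⟨C.toNat, (Int.toNat_of_nonneg hC).symm⟩
  rw [pvSumRange, pvSumRange]
  calc
    (∑ kr ∈ Finset.range (((Rn : Int) - 0).toNat),
      ((PySem.List.pyRange 0 (Cn : Int) 1).map (fun c =>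
        ((PySem.List.pyRange 1 (min ((Rn : Int) - (0 + kr)) ((Cn : Int) - c)) 1).map
          (fun i => F (0 + kr) c i)).sum)).sum)
      = ∑ kr ∈ Finset.range Rn, ∑ kc ∈ Finset.range Cn,
          ∑ ki ∈ Finset.range ((min ((Rn : Int) - kr) ((Cn : Int) - kc) - 1).toNat),
            F kr kc (1 + ki) := by
        apply Finset.sum_congr (by congr 1)
        intro kr _
        rw [pvSumRange]
        apply Finset.sum_congr (by congr 1)
        intro kc _
        rw [pvSumRange]
        apply Finset.sum_congr (by congr 1; omega)
        intro ki _
        norm_num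
    _ = ∑ ki ∈ Finset.range ((min (Rn : Int) (Cn : Int) - 1).toNat),
          ∑ kr ∈ Finset.range (((Rn : Int) - (1 + ki)).toNat),
            ∑ kc ∈ Finset.range (((Cn : Int) - (1 + ki)).toNat), F kr kc (1 + ki) :=
        pvSwapNat Rn Cn (fun kr kc ki => F kr kc (1 + ki))
    _ = _ := by
        apply Finset.sum_congr (by congr 1)
        intro ki _
        rw [pvSumRange]
        apply Finset.sum_congr (by congr 1; omega)
        intro kr _
        rw [pvSumRange]
        apply Finset.sum_congr (by congr 1; omega)
        intro kc _
        norm_num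

-- ===== VERDICT (by name: the statement is the Claim_ definition above) =====
theorem flood_control_spec : Claim_equal_flood_control := by
  unfold Claim_equal_flood_control
  intro grid _hdom hpre
  unfold Spec_flood_control
  obtain ⟨hne, hrows⟩ := hpre
  cases grid with
  | nil => exact absurd rfl hne
  | cons row0 rest =>
    simp only [List.headI] at hrows
    have hCval : PySem.Str.len row0 = (row0.toList.length : Int) := by simp [pysem]
    have hR0 : (0 : Int) ≤ ((row0 :: rest).length : Int) := Int.natCast_nonneg _
    have hC0 : (0 : Int) ≤ PySem.Str.len row0 := by
      rw [hCval]; exact Int.natCast_nonneg _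
    have hcell : ∀ tr tc : Int, 2 ≤ ((row0 :: rest).length : Int) → 2 ≤ PySem.Str.len row0 →
        0 ≤ tr → tr < ((row0 :: rest).length : Int) → 0 ≤ tc → tc < PySem.Str.len row0 →
        (pvGetB (row0 :: rest) tr tc).isSome := by
      intro tr tc h2R h2C h1 h2 h3 h4
      rw [hCval] at h2C h4
      have hlen : ∀ s ∈ row0 :: rest, row0.toList.length ≤ s.toList.length :=
        hrows (by exact_mod_cast h2R) (by exact_mod_cast h2C)
      simp only [pvGetB]
      obtain ⟨row, hrow⟩ : ∃ s, PySem.List.pyGet? (row0 :: rest) tr = some s := by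
        rw [PySem.List.pyGet?_eq_some_getElem (row0 :: rest) h1 h2]
        exact ⟨_, rfl⟩
      have hle := hlen row (PySem.List.mem_of_pyGet?_eq_some _ hrow)
      have hstr : PySem.Str.pyGet? row tc = PySem.List.pyGet? row.toList tc := by
        simp [pysem]
      rw [hrow]
      dsimp only
      rw [hstr, PySem.List.pyGet?_eq_some_getElem row.toList h3 (by omega)]
      simp
    simp only [flood_control, flood_control_alt, PySem.List.pyGet?_zero_cons]
    have hA : (PySem.List.pyRange 0 ((row0 :: rest).length : Int) 1).foldl (fun acc r =>
          (PySem.List.pyRange 0 (PySem.Str.len row0) 1).foldl (fun acc2 c =>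
            (PySem.List.pyRange 1
                (min (((row0 :: rest).length : Int) - r) (PySem.Str.len row0 - c)) 1).foldl
              (fun acc3 i =>
                match acc3, check_square r c (r + i) (c + i) (row0 :: rest) with
                | some l, some b => if b then some (l ++ [(i - 1) ^ 2]) else some l
                | _, _ => none) acc2) acc) (some ([] : List Int))
        = some ([] ++ (PySem.List.pyRange 0 ((row0 :: rest).length : Int) 1).flatMap (fun r =>
            (PySem.List.pyRange 0 (PySem.Str.len row0) 1).flatMap (fun c =>
              ((PySem.List.pyRange 1
                  (min (((row0 :: rest).length : Int) - r) (PySem.Str.len row0 - c)) 1).filter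
                (fun i => pvSq (row0 :: rest) r c i)).map (fun i => (i - 1) ^ 2)))) := by
      apply pvFoldOptFlat
      intro r hr l
      rw [PySem.List.mem_pyRange_one] at hr
      apply pvFoldOptFlat
      intro c hc l2
      rw [PySem.List.mem_pyRange_one] at hc
      apply pvFoldOptIf
      intro i hi l3
      rw [PySem.List.mem_pyRange_one] at hi
      have h2R : 2 ≤ ((row0 :: rest).length : Int) := by omega
      have h2C : 2 ≤ PySem.Str.len row0 := by omega
      rw [pvCheckA (row0 :: rest) r c i (by omega)
        (fun dr dc hd1 hd2 hd3 hd4 => hcell (r + dr) (c + dc) h2R h2C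
          (by omega) (by omega) (by omega) (by omega))]
    have hB : (PySem.List.pyRange 1
          (min ((row0 :: rest).length : Int) (PySem.Str.len row0)) 1).foldl (fun acc i =>
          (PySem.List.pyRange 0 (((row0 :: rest).length : Int) - i) 1).foldl (fun acc2 r =>
            (PySem.List.pyRange 0 (PySem.Str.len row0 - i) 1).foldl (fun acc3 c =>
              match acc3 with
              | none => none
              | some t =>
                match pvAllOK (row0 :: rest) r c i with
                | none => none
                | some b => some (if b then t + (i - 1) ^ 2 else t)) acc2) acc) (some (0 : Int))
        = some (0 + ((PySem.List.pyRange 1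
            (min ((row0 :: rest).length : Int) (PySem.Str.len row0)) 1).map (fun i =>
            ((PySem.List.pyRange 0 (((row0 :: rest).length : Int) - i) 1).map (fun r =>
              (((PySem.List.pyRange 0 (PySem.Str.len row0 - i) 1).filter
                (fun c => pvSq (row0 :: rest) r c i)).map (fun _ => (i - 1) ^ 2)).sum)).sum)).sum) := by
      apply pvFoldOptAdd
      intro i hi t
      rw [PySem.List.mem_pyRange_one] at hi
      apply pvFoldOptAdd
      intro r hr t2
      rw [PySem.List.mem_pyRange_one] at hr
      apply pvFoldOptAddIf
      intro c hc t3
      rw [PySem.List.mem_pyRange_one] at hc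
      have h2R : 2 ≤ ((row0 :: rest).length : Int) := by omega
      have h2C : 2 ≤ PySem.Str.len row0 := by omega
      rw [pvAllOK_eq (row0 :: rest) r c i (by omega)
        (fun dr dc hd1 hd2 hd3 hd4 => hcell (r + dr) (c + dc) h2R h2C
          (by omega) (by omega) (by omega) (by omega))]
    rw [hA, hB]
    dsimp only
    simp only [List.nil_append, zero_add]
    congr 1
    rw [← List.sum_eq_foldl]
    simp only [pvSumFlatMap, pvSumFilter]
    exact pvSwapSum ((row0 :: rest).length : Int) (PySem.Str.len row0) hR0 hC0
      (fun r c i => if pvSq (row0 :: rest) r c i then (i - 1) ^ 2 else 0)
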